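-- pv_equiv track=rewrite | github.com/shadowlink0122/Cm | tests/bench_marks/python/benchmark.py | array_operations
-- ===== SOURCE A (Python) =====
-- def array_operations(size):
--     # 配列初期化
--     arr = list(range(size))
--
--     # バブルソート
--     for i in range(size - 1):
--         for j in range(size - i - 1):
--             if arr[j] > arr[j + 1]:
--                 arr[j], arr[j + 1] = arr[j + 1], arr[j]
--
--     # 配列の合計
--     total = sum(arr)
--     return total
-- ===== SOURCE B (Python) =====
-- def array_operations(size):
--     # range(size) is already sorted, so the bubble sort is a no-op and the
--     # result is just sum(range(size)) = n*(n-1)//2 with n = max(size, 0).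
--     n = size if size > 0 else 0
--     return n * (n - 1) // 2
-- ===== Notes on version B (the rewrite author's own statement) =====
-- stated objective: faster
-- what changed: Replaced the bubble sort over range(size) (a no-op on sorted input) plus summation by the closed-form triangular-number formula max(size,0)*(max(size,0)-1)//2.
import Mathlib
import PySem

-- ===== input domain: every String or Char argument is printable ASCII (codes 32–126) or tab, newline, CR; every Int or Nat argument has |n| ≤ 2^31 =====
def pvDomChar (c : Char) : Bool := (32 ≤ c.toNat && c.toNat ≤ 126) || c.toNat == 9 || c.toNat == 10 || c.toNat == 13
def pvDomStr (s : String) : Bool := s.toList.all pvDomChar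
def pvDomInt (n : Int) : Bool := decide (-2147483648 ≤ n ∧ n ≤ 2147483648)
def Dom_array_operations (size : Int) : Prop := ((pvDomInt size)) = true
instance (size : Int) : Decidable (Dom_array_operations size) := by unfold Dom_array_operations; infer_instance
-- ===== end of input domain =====

-- B replaces A's bubble sort of the already-sorted range(size) plus summation by the
-- closed-form triangular-number formula (objective: faster, O(1) vs O(n^2)).

-- ===== PORT A =====
-- one inner-loop step: 'if arr[j] > arr[j+1]: arr[j], arr[j+1] = arr[j+1], arr[j]'
-- (arr[j] ported with pyGet?; the 'none' branch is unreachable since Python's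
-- indices are always in range here, matching Python exactly on every reached state)
def pvBubbleStep (arr : List Int) (j : Int) : List Int :=
  match PySem.List.pyGet? arr j, PySem.List.pyGet? arr (j + 1) with
  | some x, some y =>
      if x > y then (arr.set j.toNat y).set (j + 1).toNat x else arr
  | _, _ => arr

def array_operations (size : Int) : Int :=
  -- arr = list(range(size))
  let arr0 := PySem.List.pyRange 0 size 1
  -- for i in range(size - 1): for j in range(size - i - 1): …
  let arr :=
    (PySem.List.pyRange 0 (size - 1) 1).foldl
      (fun arr i =>
        (PySem.List.pyRange 0 (size - i - 1) 1).foldl pvBubbleStep arr)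
      arr0
  arr.sum

-- ===== PORT B =====
def array_operations_alt (size : Int) : Int :=
  let n : Int := if size > 0 then size else 0
  PySem.Int.floordiv (n * (n - 1)) 2

-- ===== PRECONDITION & SPEC =====
def Spec_array_operations (size : Int) (out : Int) : Prop := out = array_operations_alt size
instance (size : Int) (out : Int) : Decidable (Spec_array_operations size out) := by unfold Spec_array_operations; infer_instance

-- ===== CLAIM (what is proved, stated in full; the proofs are below) =====
def Claim_equal_array_operations : Prop := ∀ (size : Int), Dom_array_operations size → Spec_array_operations size (array_operations size)

-- ===== LEMMAS AND PROOFS =====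

-- the range list is strictly sorted, so a bubble step fixes it
theorem pvBubbleStep_fix (size j : Int) (hj : 0 ≤ j) (hj1 : j + 1 < size) :
    pvBubbleStep (PySem.List.pyRange 0 size 1) j = PySem.List.pyRange 0 size 1 := by
  unfold pvBubbleStep
  have h1 : PySem.List.pyGet? (PySem.List.pyRange 0 size 1) j = some j := by
    simp [PySem.List.pyGet?, PySem.List.pyIdx?, hj, show j < size by omega,
      Int.toNat_of_nonneg hj]
  have h2 : PySem.List.pyGet? (PySem.List.pyRange 0 size 1) (j + 1) = some (j + 1) := by
    simp [PySem.List.pyGet?, PySem.List.pyIdx?, show (0:Int) ≤ j + 1 by omega, hj1,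
      Int.toNat_of_nonneg (show (0:Int) ≤ j + 1 by omega)]
  rw [h1, h2]
  simp

theorem pvInner_fix (size b : Int) (hb : b ≤ size - 1) :
    (PySem.List.pyRange 0 b 1).foldl pvBubbleStep (PySem.List.pyRange 0 size 1)
      = PySem.List.pyRange 0 size 1 := by
  have key : ∀ (l : List Int), (∀ j ∈ l, 0 ≤ j ∧ j + 1 < size) →
      l.foldl pvBubbleStep (PySem.List.pyRange 0 size 1) = PySem.List.pyRange 0 size 1 := by
    intro l
    induction l with
    | nil => intro _; rfl
    | cons x xs ih =>
      intro h
      have hx := h x (by simp)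
      simp only [List.foldl_cons, pvBubbleStep_fix size x hx.1 hx.2]
      exact ih (fun j hj => h j (by simp [hj]))
  apply key
  intro j hj
  rw [PySem.List.mem_pyRange_one] at hj
  omega

theorem pvOuter_fix (size : Int) :
    (PySem.List.pyRange 0 (size - 1) 1).foldl
      (fun arr i => (PySem.List.pyRange 0 (size - i - 1) 1).foldl pvBubbleStep arr)
      (PySem.List.pyRange 0 size 1) = PySem.List.pyRange 0 size 1 := by
  have key : ∀ (l : List Int), (∀ i ∈ l, 0 ≤ i) →
      l.foldl (fun arr i => (PySem.List.pyRange 0 (size - i - 1) 1).foldl pvBubbleStep arr)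
        (PySem.List.pyRange 0 size 1) = PySem.List.pyRange 0 size 1 := by
    intro l
    induction l with
    | nil => intro _; rfl
    | cons x xs ih =>
      intro h
      have hx := h x (by simp)
      simp only [List.foldl_cons, pvInner_fix size (size - x - 1) (by omega)]
      exact ih (fun i hi => h i (by simp [hi]))
  apply key
  intro i hi
  rw [PySem.List.mem_pyRange_one] at hi
  omega

theorem pvSum_range (m : Nat) : 2 * (PySem.List.pyRange 0 (m : Int) 1).sum = m * (m - 1) := by
  induction m with
  | zero => simp [PySem.List.pyRange_one_eq_nil]
  | succ k ih =>
    have h : ((k + 1 : Nat) : Int) = (k : Int) + 1 := by push_cast; ring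
    rw [h, PySem.List.pyRange_one_succ_right (by positivity)]
    simp only [List.sum_append, List.sum_cons, List.sum_nil]
    push_cast at ih ⊢
    nlinarith [ih]

-- ===== VERDICT (by name: the statement is the Claim_ definition above) =====
theorem array_operations_spec : Claim_equal_array_operations := by
  intro size _
  unfold Spec_array_operations array_operations array_operations_alt
  simp only [pvOuter_fix]
  by_cases hs : size > 0
  · simp only [if_pos hs]
    have h2 : 2 * (PySem.List.pyRange 0 size 1).sum = size * (size - 1) := by
      have := pvSum_range size.toNat
      rwa [Int.toNat_of_nonneg (by omega)] at this
    rw [eq_comm, PySem.Int.floordiv_eq_iff_of_pos (by omega)]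
    omega
  · simp only [if_neg hs]
    rw [PySem.List.pyRange_one_eq_nil (by omega)]
    decide
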